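-- pv_equiv track=rewrite | github.com/lukeboxwalker/advent-of-code | year_2023/day_02/puzzle.py | game_power_value
-- ===== SOURCE A (Python) =====
-- def game_power_value(game):
--     red = 0
--     green = 0
--     blue = 0
--     for sets in game[1]:
--         for color in sets:
--             if color[1] == "red":
--                 red = max(red, color[0])
--             if color[1] == "green":
--                 green = max(green, color[0])
--             if color[1] == "blue":
--                 blue = max(blue, color[0])
--     return red * green * blue
-- ===== SOURCE B (Python) =====
-- def game_power_value(game):
--     # sort-then-scan: seed zero entries, sort all draws descending by count,
--     # then the first occurrence of each color is its maximum
--     entries = [(0, "red"), (0, "green"), (0, "blue")]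
--     for s in game[1]:
--         entries.extend(s)
--     entries.sort(key=lambda c: c[0], reverse=True)
--     best = {}
--     for count, color in entries:
--         if color not in best:
--             best[color] = count
--     return best["red"] * best["green"] * best["blue"]
-- ===== Notes on version B (the rewrite author's own statement) =====
-- stated objective: alternative
-- what changed: Replaces the single-pass triple-maximum loop by sort-then-scan: seed a zero entry per color, flatten and sort all draws descending by count, then take the first occurrence of each color as its maximum; trades O(n) for O(n log n) but needs no interleaved mutable maxima.
import Mathlib
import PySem

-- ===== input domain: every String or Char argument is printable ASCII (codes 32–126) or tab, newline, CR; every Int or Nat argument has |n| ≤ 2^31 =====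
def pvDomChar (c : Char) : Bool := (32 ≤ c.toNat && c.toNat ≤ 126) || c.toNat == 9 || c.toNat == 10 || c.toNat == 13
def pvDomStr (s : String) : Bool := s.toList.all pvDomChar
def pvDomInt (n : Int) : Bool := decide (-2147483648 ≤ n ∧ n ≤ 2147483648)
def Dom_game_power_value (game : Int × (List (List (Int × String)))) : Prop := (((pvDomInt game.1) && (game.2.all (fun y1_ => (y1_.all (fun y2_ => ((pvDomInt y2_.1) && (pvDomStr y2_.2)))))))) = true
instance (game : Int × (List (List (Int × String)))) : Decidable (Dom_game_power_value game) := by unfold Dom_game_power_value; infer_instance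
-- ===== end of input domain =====

-- B replaces A's one-pass triple-maximum loop by sort-then-scan: seed zero entries,
-- sort all draws descending by count, take the first occurrence of each color (alternative, O(n log n)).

-- ===== PORT A =====
-- one pass over all colour entries, updating the (red, green, blue) state
def game_power_value (game : Int × (List (List (Int × String)))) : Int :=
  let st := game.2.foldl (fun st sets =>
    sets.foldl (fun st color =>
      let red := if color.2 == "red" then max st.1 color.1 else st.1
      let green := if color.2 == "green" then max st.2.1 color.1 else st.2.1
      let blue := if color.2 == "blue" then max st.2.2 color.1 else st.2.2
      (red, green, blue)) st) ((0 : Int), (0 : Int), (0 : Int))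
  st.1 * st.2.1 * st.2.2

-- ===== PORT B =====
-- entries = seeds; extend per set; entries.sort(key=c[0], reverse=True); first occurrence per color
def game_power_value_alt (game : Int × (List (List (Int × String)))) : Int :=
  let entries := game.2.foldl (fun e s => e ++ s)
    [((0 : Int), "red"), ((0 : Int), "green"), ((0 : Int), "blue")]
  let srt := PySem.List.sorted entries (fun c => c.1) true
  let best := srt.foldl (fun (d : PySem.Dict String Int) c =>
    if d.contains c.2 then d else d.insert c.2 c.1) PySem.Dict.empty
  -- best["red"] etc.: the seeds guarantee each key is present, so getD's default is unreachable
  best.getD "red" 0 * best.getD "green" 0 * best.getD "blue" 0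

-- ===== PRECONDITION & SPEC =====
def Spec_game_power_value (game : Int × (List (List (Int × String)))) (out : Int) : Prop := out = game_power_value_alt game
instance (game : Int × (List (List (Int × String)))) (out : Int) : Decidable (Spec_game_power_value game out) := by unfold Spec_game_power_value; infer_instance

-- ===== CLAIM (what is proved, stated in full; the proofs are below) =====
def Claim_equal_game_power_value : Prop := ∀ (game : Int × (List (List (Int × String)))), Dom_game_power_value game → Spec_game_power_value game (game_power_value game)

-- ===== LEMMAS AND PROOFS =====

-- A's conditional-max update for one color
def condMax (c : String) (m : Int) (e : Int × String) : Int :=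
  if e.2 == c then max m e.1 else m

-- value carried by the first entry of color c
def firstOcc (c : String) : List (Int × String) → Option Int
  | [] => none
  | e :: t => if e.2 == c then some e.1 else firstOcc c t

-- A's triple-state fold over a flat list splits into three independent condMax folds
theorem tripleFold (l : List (Int × String)) (st : Int × Int × Int) :
    l.foldl (fun st color =>
      let red := if color.2 == "red" then max st.1 color.1 else st.1
      let green := if color.2 == "green" then max st.2.1 color.1 else st.2.1
      let blue := if color.2 == "blue" then max st.2.2 color.1 else st.2.2
      (red, green, blue)) st
    = (l.foldl (condMax "red") st.1,
       l.foldl (condMax "green") st.2.1,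
       l.foldl (condMax "blue") st.2.2) := by
  induction l generalizing st with
  | nil => rfl
  | cons c t ih => simp only [List.foldl_cons, ih, condMax]

-- condMax fold is invariant under permutation
theorem condMax_perm {l l' : List (Int × String)} (h : l.Perm l') (c : String) (m : Int) :
    l.foldl (condMax c) m = l'.foldl (condMax c) m := by
  apply h.foldl_eq'
  intro a _ b _ z
  simp only [condMax]
  split_ifs <;> simp [max_comm, max_left_comm]

-- a fold start dominating every entry is a fixed point
theorem condMax_dominated (c : String) (t : List (Int × String)) :
    ∀ m, (∀ b ∈ t, b.1 ≤ m) → t.foldl (condMax c) m = m := by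
  induction t with
  | nil => intro m _; rfl
  | cons e t ih =>
    intro m h
    simp only [List.foldl_cons, condMax]
    have he := h e (by simp)
    split_ifs with hc
    · rw [max_eq_left he]; exact ih m fun b hb => h b (by simp [hb])
    · exact ih m fun b hb => h b (by simp [hb])

-- on a descending-sorted list, the condMax fold is max with the first occurrence
theorem condMax_sorted (c : String) :
    ∀ (l : List (Int × String)), l.Pairwise (fun a b => b.1 ≤ a.1) →
    ∀ v, firstOcc c l = some v → ∀ m, l.foldl (condMax c) m = max m v := by
  intro l
  induction l with
  | nil => intro _ v h; simp [firstOcc] at h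
  | cons e t ih =>
    intro hp v hv m
    rw [List.pairwise_cons] at hp
    simp only [firstOcc] at hv
    simp only [List.foldl_cons, condMax]
    by_cases hc : e.2 == c
    · simp only [hc, if_true] at hv ⊢
      cases hv
      exact condMax_dominated c t (max m e.1) fun b hb => le_trans (hp.1 b hb) (le_max_right _ _)
    · simp only [hc, Bool.false_eq_true, if_false] at hv ⊢
      exact ih hp.2 v hv m

-- first occurrence dominates every same-colored entry in a descending-sorted list
theorem firstOcc_dominates (c : String) :
    ∀ (l : List (Int × String)), l.Pairwise (fun a b => b.1 ≤ a.1) →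
    ∀ v, firstOcc c l = some v → ∀ p ∈ l, p.2 = c → p.1 ≤ v := by
  intro l
  induction l with
  | nil => intro _ v _ p hp; simp at hp
  | cons e t ih =>
    intro hp v hv p hmem hpc
    rw [List.pairwise_cons] at hp
    simp only [firstOcc] at hv
    by_cases hc : e.2 == c
    · simp only [hc, if_true] at hv
      cases hv
      rcases List.mem_cons.mp hmem with h | h
      · simp [h]
      · exact hp.1 p h
    · simp only [hc, Bool.false_eq_true, if_false] at hv
      rcases List.mem_cons.mp hmem with h | h
      · subst h; exact absurd (by simp [hpc]) hc
      · exact ih hp.2 v hv p h hpc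

-- if some entry has color c, firstOcc finds one
theorem firstOcc_isSome (c : String) :
    ∀ (l : List (Int × String)), ∀ p ∈ l, p.2 = c → (firstOcc c l).isSome := by
  intro l
  induction l with
  | nil => intro p hp; simp at hp
  | cons e t ih =>
    intro p hmem hpc
    simp only [firstOcc]
    by_cases hc : e.2 == c
    · simp [hc]
    · simp only [hc, Bool.false_eq_true, if_false]
      rcases List.mem_cons.mp hmem with h | h
      · subst h; exact absurd (by simp [hpc]) hc
      · exact ih p h hpc

-- B's first-occurrence dict fold looks up as firstOcc
theorem dictFold_get? (c : String) :
    ∀ (l : List (Int × String)) (d : PySem.Dict String Int),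
    (l.foldl (fun (d : PySem.Dict String Int) e =>
        if d.contains e.2 then d else d.insert e.2 e.1) d).get? c
      = (d.get? c).or (firstOcc c l) := by
  intro l
  induction l with
  | nil => intro d; simp [firstOcc]
  | cons e t ih =>
    intro d
    simp only [List.foldl_cons, firstOcc]
    by_cases hd : d.contains e.2 = true
    · rw [if_pos hd, ih]
      rw [PySem.Dict.contains_eq_isSome_get?] at hd
      by_cases hc : e.2 == c
      · have hce : c = e.2 := (eq_of_beq hc).symm
        subst hce
        obtain ⟨w, hw⟩ := Option.isSome_iff_exists.mp hd
        rw [hw]; rfl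
      · rw [if_neg hc]
    · rw [if_neg hd, ih]
      rw [PySem.Dict.contains_eq_isSome_get?] at hd
      have hnone : d.get? e.2 = none := by
        cases hg : d.get? e.2 <;> simp_all
      by_cases hc : e.2 == c
      · have hce : c = e.2 := (eq_of_beq hc).symm
        subst hce
        rw [PySem.Dict.get?_insert_self, hnone]
        simp
      · have hne : c ≠ e.2 := fun h => hc (by simp [h])
        rw [PySem.Dict.get?_insert_of_ne _ _ hne, if_neg hc]

-- the per-color equality: A's condMax fold over entries = B's dict value, given a seed (0, c) ∈ entries
theorem color_eq (c : String) (entries : List (Int × String))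
    (hseed : ((0 : Int), c) ∈ entries) :
    entries.foldl (condMax c) 0
      = ((PySem.List.sorted entries (fun x => x.1) true).foldl
          (fun (d : PySem.Dict String Int) e =>
            if d.contains e.2 then d else d.insert e.2 e.1) PySem.Dict.empty).getD c 0 := by
  set srt := PySem.List.sorted entries (fun x => x.1) true with hsrt
  have hperm : srt.Perm entries := PySem.List.sorted_perm entries (fun x => x.1) true
  have hpw : srt.Pairwise (fun a b => b.1 ≤ a.1) :=
    PySem.List.sorted_pairwise_rev entries (fun x => x.1)
  have hmem : ((0 : Int), c) ∈ srt := hperm.mem_iff.mpr hseed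
  have hsome := firstOcc_isSome c srt ((0 : Int), c) hmem rfl
  obtain ⟨v, hv⟩ := Option.isSome_iff_exists.mp hsome
  have h0v : (0 : Int) ≤ v := firstOcc_dominates c srt hpw v hv ((0 : Int), c) hmem rfl
  rw [← condMax_perm hperm, condMax_sorted c srt hpw v hv 0, max_eq_right h0v]
  rw [PySem.Dict.getD_eq_get?_getD, dictFold_get? c srt PySem.Dict.empty]
  simp [hv, PySem.Dict.get?_empty]

-- ===== VERDICT (by name: the statement is the Claim_ definition above) =====
theorem game_power_value_spec : Claim_equal_game_power_value := by
  intro game _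
  show game_power_value game = game_power_value_alt game
  unfold game_power_value game_power_value_alt
  have hentries : game.2.foldl (fun e s => e ++ s)
      [((0 : Int), "red"), ((0 : Int), "green"), ((0 : Int), "blue")]
      = [((0 : Int), "red"), ((0 : Int), "green"), ((0 : Int), "blue")]
        ++ game.2.flatMap (fun s => s) :=
    PySem.List.foldl_append_eq_flatMap (fun s => s) game.2 _
  have hA : game.2.foldl (fun st sets =>
      sets.foldl (fun st (color : Int × String) =>
        let red := if color.2 == "red" then max st.1 color.1 else st.1
        let green := if color.2 == "green" then max st.2.1 color.1 else st.2.1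
        let blue := if color.2 == "blue" then max st.2.2 color.1 else st.2.2
        (red, green, blue)) st) ((0 : Int), (0 : Int), (0 : Int))
      = ((game.2.flatMap (fun s => s)).foldl (condMax "red") 0,
         (game.2.flatMap (fun s => s)).foldl (condMax "green") 0,
         (game.2.flatMap (fun s => s)).foldl (condMax "blue") 0) := by
    rw [← List.foldl_flatMap, tripleFold]
  simp only [hA, hentries]
  have key : ∀ c : String, ((0 : Int), c) ∈
      ([((0 : Int), "red"), ((0 : Int), "green"), ((0 : Int), "blue")]
        ++ game.2.flatMap (fun s => s)) →
      (game.2.flatMap (fun s => s)).foldl (condMax c) 0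
        = (([((0 : Int), "red"), ((0 : Int), "green"), ((0 : Int), "blue")]
            ++ game.2.flatMap (fun s => s)).foldl (condMax c) 0) := by
    intro c _
    rw [List.foldl_append]
    congr 1
    simp [condMax]
  rw [key "red" (by simp), key "green" (by simp), key "blue" (by simp),
      color_eq "red" _ (by simp), color_eq "green" _ (by simp), color_eq "blue" _ (by simp)]
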